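-- pv_equiv track=rewrite | github.com/mchaldebas/5ULTRA | fiveULTRA/scripts/detection.py | calculate_genomic_position_from_five_cap
-- ===== SOURCE A (Python) =====
-- def calculate_genomic_position_from_five_cap(exons, strand, distance):
--     """Calculates the genomic position from a given distance from the 5' cap."""
--     exons.sort(key=lambda x: x[0])
--     exons = exons if strand == '+' else list(reversed(exons))
--     remaining_distance = distance
--     for exon_start, exon_end in exons:
--         exon_length = exon_end - exon_start + 1
--         if remaining_distance <= exon_length:
--             return exon_start + remaining_distance if strand == '+' else exon_end - remaining_distance
--         else:
--             remaining_distance -= exon_length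
--     return exon_start + remaining_distance if strand == '+' else exon_end - remaining_distance
-- ===== SOURCE B (Python) =====
-- def calculate_genomic_position_from_five_cap(exons, strand, distance):
--     """Calculates the genomic position from a given distance from the 5' cap."""
--     exons.sort(key=lambda x: x[0])
--     ordered = exons if strand == '+' else exons[::-1]
--     prefix = [0]
--     for s, e in ordered:
--         prefix.append(prefix[-1] + e - s + 1)
--     n = len(ordered)
--     i = next((k for k in range(n) if distance <= prefix[k + 1]), None)
--     if i is None:
--         i, off = n - 1, distance - prefix[n]
--     else:
--         off = distance - prefix[i]
--     s, e = ordered[i]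
--     return s + off if strand == '+' else e - off
-- ===== Notes on version B (the rewrite author's own statement) =====
-- stated objective: alternative
-- what changed: Replaces A's running-remainder loop (mutating remaining_distance with an early return) by a prefix-sum list of cumulative exon lengths, a first-index scan, and a closed-form offset distance - prefix[i]; the past-the-end fall-through becomes the explicit none-branch on the last exon.
-- outside the precondition, e.g. on calculate_genomic_position_from_five_cap([], '+', 3): A raises UnboundLocalError, B raises IndexError
import Mathlib
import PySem

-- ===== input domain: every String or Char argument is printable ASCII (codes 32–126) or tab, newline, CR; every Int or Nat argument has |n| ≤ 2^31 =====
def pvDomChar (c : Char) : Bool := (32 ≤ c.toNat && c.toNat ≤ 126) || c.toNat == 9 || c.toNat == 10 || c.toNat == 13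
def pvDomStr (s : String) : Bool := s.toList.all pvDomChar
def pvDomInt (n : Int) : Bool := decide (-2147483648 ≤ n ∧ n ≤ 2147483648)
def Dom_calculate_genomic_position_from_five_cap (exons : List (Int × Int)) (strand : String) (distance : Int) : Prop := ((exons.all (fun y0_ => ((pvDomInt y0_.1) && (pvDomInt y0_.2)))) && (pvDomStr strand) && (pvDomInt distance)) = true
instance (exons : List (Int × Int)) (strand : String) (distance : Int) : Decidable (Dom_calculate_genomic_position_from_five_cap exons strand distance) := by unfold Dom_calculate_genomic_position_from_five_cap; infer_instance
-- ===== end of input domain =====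

-- B replaces A's running-remainder loop by a prefix-sum list + first-index scan with a closed-form
-- offset (objective: alternative decomposition, same cost). Both A and B sort `exons` in place; the
-- equivalence proved here is about the return value (the mutation is identical anyway).

-- ===== PORT A =====
-- A's for-loop: carries remaining_distance and the last (exon_start, exon_end) seen (used by the
-- post-loop fall-through return; the initial dummy is never used since Pre_ requires exons ≠ []).
def pvLoopA : List (Int × Int) → String → Int → Int × Int → Int
  | [], strand, rem, last =>
      if strand == "+" then last.1 + rem else last.2 - rem
  | (s, e) :: rest, strand, rem, _ =>
      let len := e - s + 1
      if rem ≤ len then (if strand == "+" then s + rem else e - rem)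
      else pvLoopA rest strand (rem - len) (s, e)

def calculate_genomic_position_from_five_cap (exons : List (Int × Int)) (strand : String) (distance : Int) : Int :=
  let sortedExons := PySem.List.sorted exons (fun p => p.1) false
  let ordered := if strand == "+" then sortedExons else sortedExons.reverse
  pvLoopA ordered strand distance (0, 0)

-- ===== PORT B =====
-- B's prefix-building loop: `prefix = [0]; for s, e in ordered: prefix.append(prefix[-1] + e - s + 1)`
def pvBuildPrefix : List (Int × Int) → List Int → List Int
  | [], acc => acc
  | (s, e) :: rest, acc => pvBuildPrefix rest (acc ++ [acc.getLast! + e - s + 1])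

def calculate_genomic_position_from_five_cap_alt (exons : List (Int × Int)) (strand : String) (distance : Int) : Int :=
  let sortedExons := PySem.List.sorted exons (fun p => p.1) false
  let ordered := if strand == "+" then sortedExons else sortedExons.reverse
  let pref := pvBuildPrefix ordered [0]
  let n := ordered.length
  match (List.range n).find? (fun k => decide (distance ≤ pref.getD (k + 1) 0)) with
  | some i =>
      let off := distance - pref.getD i 0
      let p := ordered.getD i (0, 0)
      if strand == "+" then p.1 + off else p.2 - off
  | none =>
      let off := distance - pref.getD n 0
      let p := ordered.getD (n - 1) (0, 0)
      if strand == "+" then p.1 + off else p.2 - off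

-- ===== PRECONDITION & SPEC =====
-- Pre_ excludes only the empty exon list, on which A raises (NameError/UnboundLocalError: the loop
-- variables are never bound).
def Pre_calculate_genomic_position_from_five_cap (exons : List (Int × Int)) (strand : String) (distance : Int) : Prop := exons ≠ []
instance (exons : List (Int × Int)) (strand : String) (distance : Int) : Decidable (Pre_calculate_genomic_position_from_five_cap exons strand distance) := by unfold Pre_calculate_genomic_position_from_five_cap; infer_instance

def pvWitness_calculate_genomic_position_from_five_cap : (List (Int × Int)) × String × Int := ([(1, 5)], "+", 2)

def Spec_calculate_genomic_position_from_five_cap (exons : List (Int × Int)) (strand : String) (distance : Int) (out : Int) : Prop := out = calculate_genomic_position_from_five_cap_alt exons strand distance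
instance (exons : List (Int × Int)) (strand : String) (distance : Int) (out : Int) : Decidable (Spec_calculate_genomic_position_from_five_cap exons strand distance out) := by unfold Spec_calculate_genomic_position_from_five_cap; infer_instance

-- ===== CLAIM (what is proved, stated in full; the proofs are below) =====
def Claim_equal_calculate_genomic_position_from_five_cap : Prop := ∀ (exons : List (Int × Int)) (strand : String) (distance : Int), Dom_calculate_genomic_position_from_five_cap exons strand distance → Pre_calculate_genomic_position_from_five_cap exons strand distance → Spec_calculate_genomic_position_from_five_cap exons strand distance (calculate_genomic_position_from_five_cap exons strand distance)

-- ===== LEMMAS AND PROOFS =====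

-- recursive characterisation of B's prefix list (tail after the leading base value)
def pvTail : Int → List (Int × Int) → List Int
  | _, [] => []
  | a, (s, e) :: r => (a + e - s + 1) :: pvTail (a + e - s + 1) r

lemma pvTail_length (l : List (Int × Int)) (a : Int) : (pvTail a l).length = l.length := by
  induction l generalizing a with
  | nil => rfl
  | cons p r ih => cases p; simp [pvTail, ih]

lemma pvTail_shift (l : List (Int × Int)) (a : Int) :
    pvTail a l = (pvTail 0 l).map (fun x => x + a) := by
  induction l generalizing a with
  | nil => rfl
  | cons p r ih =>
    cases p with
    | mk s e =>
      simp only [pvTail, ih (a + e - s + 1), ih (0 + e - s + 1), List.map_cons, List.map_map]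
      congr 1
      · ring
      · apply List.map_congr_left; intro x _; simp only [Function.comp_apply]; ring

lemma pvBuildPrefix_eq (l : List (Int × Int)) (acc : List Int) (h : acc ≠ []) :
    pvBuildPrefix l acc = acc ++ pvTail acc.getLast! l := by
  induction l generalizing acc with
  | nil => simp [pvBuildPrefix, pvTail]
  | cons p r ih =>
    cases p with
    | mk s e =>
      rw [pvBuildPrefix, ih _ (by simp)]
      have : (acc ++ [acc.getLast! + e - s + 1]).getLast! = acc.getLast! + e - s + 1 := by
        simp [List.getLast!_eq_getLast?_getD]
      rw [this, pvTail]
      simp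

lemma pvFind?_congr {α : Type} (l : List α) (p q : α → Bool) (h : ∀ a ∈ l, p a = q a) :
    l.find? p = l.find? q := by
  induction l with
  | nil => rfl
  | cons x xs ih =>
    simp only [List.find?_cons, h x (by simp)]
    cases q x <;> simp_all

def pvAltCore (l : List (Int × Int)) (strand : String) (rem : Int) : Int :=
  let pref := (0 : Int) :: pvTail 0 l
  let n := l.length
  match (List.range n).find? (fun k => decide (rem ≤ pref.getD (k + 1) 0)) with
  | some i =>
      let off := rem - pref.getD i 0
      let p := l.getD i (0, 0)
      if strand == "+" then p.1 + off else p.2 - off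
  | none =>
      let off := rem - pref.getD n 0
      let p := l.getD (n - 1) (0, 0)
      if strand == "+" then p.1 + off else p.2 - off

lemma pvPrefShift (s e : Int) (rest : List (Int × Int)) (k : Nat) (hk : k ≤ rest.length) :
    ((0:Int) :: pvTail 0 ((s,e)::rest)).getD (k+1) 0
      = ((0:Int) :: pvTail 0 rest).getD k 0 + (e - s + 1) := by
  cases k with
  | zero => simp [pvTail]
  | succ j =>
    have hj : j < (pvTail 0 rest).length := by rw [pvTail_length]; omega
    simp only [pvTail, List.getD_cons_succ]
    rw [pvTail_shift]
    rw [List.getD_eq_getElem _ _ (by simpa using hj), List.getD_eq_getElem _ _ hj]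
    simp

-- the core equivalence: A's loop equals B's prefix/scan computation, for nonempty lists
lemma pvMain (l : List (Int × Int)) (strand : String) (rem : Int) (h : l ≠ []) :
    pvLoopA l strand rem (0, 0) = pvAltCore l strand rem := by
  induction l generalizing rem with
  | nil => exact absurd rfl h
  | cons p rest ih =>
    obtain ⟨s, e⟩ := p
    by_cases hrest : rest = []
    · subst hrest
      by_cases hle : rem ≤ e - s + 1
      · simp [pvLoopA, pvAltCore, pvTail, hle]
      · simp [pvLoopA, pvAltCore, pvTail, hle]
    · have hfind : (List.range ((s,e)::rest).length).find?
            (fun k => decide (rem ≤ ((0:Int) :: pvTail 0 ((s,e)::rest)).getD (k + 1) 0))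
          = if rem ≤ e - s + 1 then some 0 else
            ((List.range rest.length).find?
              (fun k => decide (rem - (e-s+1) ≤ ((0:Int) :: pvTail 0 rest).getD (k + 1) 0))).map Nat.succ := by
        rw [List.length_cons, List.range_succ_eq_map, List.find?_cons]
        by_cases hle : rem ≤ e - s + 1
        · have : (decide (rem ≤ ((0:Int) :: pvTail 0 ((s,e)::rest)).getD (0 + 1) 0)) = true := by
            simp [pvTail]; omega
          rw [this]; simp [hle]
        · have : (decide (rem ≤ ((0:Int) :: pvTail 0 ((s,e)::rest)).getD (0 + 1) 0)) = false := by
            simp [pvTail]; omega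
          rw [this, List.find?_map, if_neg hle]
          show Option.map Nat.succ _ = Option.map Nat.succ _
          congr 1
          apply pvFind?_congr
          intro k hk
          rw [List.mem_range] at hk
          simp only [Function.comp_apply, decide_eq_decide]
          rw [pvPrefShift s e rest (k+1) (by omega)]
          omega
      by_cases hle : rem ≤ e - s + 1
      · unfold pvAltCore
        simp only []
        rw [hfind, if_pos hle]
        simp [pvLoopA, hle]
      · have hstep : pvLoopA ((s,e)::rest) strand rem (0,0)
            = pvLoopA rest strand (rem - (e - s + 1)) (0, 0) := by
          obtain ⟨q, t, rfl⟩ : ∃ q t, rest = q :: t := by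
            cases rest with
            | nil => exact absurd rfl hrest
            | cons q t => exact ⟨q, t, rfl⟩
          obtain ⟨u, v⟩ := q
          simp [pvLoopA, hle]
        rw [hstep, ih (rem - (e - s + 1)) hrest]
        unfold pvAltCore
        simp only []
        rw [hfind, if_neg hle]
        rcases hf : (List.range rest.length).find?
            (fun k => decide (rem - (e-s+1) ≤ ((0:Int) :: pvTail 0 rest).getD (k + 1) 0)) with _ | k
        · -- none: fall-through
          simp only [Option.map_none]
          have hlen : ((s,e)::rest).length = rest.length + 1 := rfl
          rw [hlen]
          rw [pvPrefShift s e rest rest.length (le_refl _)]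
          have hr1 : rest.length = (rest.length - 1) + 1 := by
            cases rest with
            | nil => exact absurd rfl hrest
            | cons _ _ => simp
          have hgd : ((s,e)::rest).getD (rest.length + 1 - 1) (0,0)
              = rest.getD (rest.length - 1) (0,0) := by
            rw [Nat.add_sub_cancel, hr1, List.getD_cons_succ, ← hr1]
          rw [hgd]
          by_cases hst : strand == "+" <;> simp [hst] <;> ring
        · -- some k
          simp only [Option.map_some]
          have hk : k < rest.length := by
            have := List.mem_of_find?_eq_some hf
            simpa [List.mem_range] using this
          rw [show Nat.succ k = k + 1 from rfl]
          rw [pvPrefShift s e rest k (by omega), List.getD_cons_succ]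
          by_cases hst : strand == "+" <;> simp [hst] <;> ring

-- ===== VERDICT (by name: the statement is the Claim_ definition above) =====
theorem calculate_genomic_position_from_five_cap_spec : Claim_equal_calculate_genomic_position_from_five_cap := by
  intro exons strand distance _ hpre
  unfold Spec_calculate_genomic_position_from_five_cap
  unfold calculate_genomic_position_from_five_cap calculate_genomic_position_from_five_cap_alt
  simp only []
  have hnes : PySem.List.sorted exons (fun p => p.1) false ≠ [] := by
    intro hs
    have := PySem.List.sorted_perm (xs := exons) (key := fun p : Int × Int => p.1) (rev := false)
    rw [hs] at this
    exact hpre (List.Perm.nil_eq this).symm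
  have hne : (if strand == "+" then PySem.List.sorted exons (fun p => p.1) false
      else (PySem.List.sorted exons (fun p => p.1) false).reverse) ≠ [] := by
    by_cases hst : strand == "+" <;> simp [hst, hnes]
  have hres := pvMain (if strand == "+" then PySem.List.sorted exons (fun p => p.1) false
      else (PySem.List.sorted exons (fun p => p.1) false).reverse) strand distance hne
  unfold pvAltCore at hres
  simp only [] at hres
  rw [show pvBuildPrefix (if strand == "+" then PySem.List.sorted exons (fun p => p.1) false
      else (PySem.List.sorted exons (fun p => p.1) false).reverse) [0]
      = (0 : Int) :: pvTail 0 (if strand == "+" then PySem.List.sorted exons (fun p => p.1) false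
      else (PySem.List.sorted exons (fun p => p.1) false).reverse) from by
    rw [pvBuildPrefix_eq _ [0] (by simp)]; simp [List.getLast!_eq_getLast?_getD]]
  exact hres
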